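-- pv_equiv track=rewrite | github.com/pekarchuk/Vigenere_cipher | vigenere.py | matches_bigram_start
-- ===== SOURCE A (Python) =====
-- def matches_bigram_start(ciphertext):
--     """Analysing bigrams frequency in text, returns [('MB', (38, 2))] in descending order"""
--     bigrams_count_dict = dict()
--     bigram_new = dict()
--     bigrams = [ciphertext[i:i+2] for i in range(0, len(ciphertext), 2)]
--     for e in set(bigrams):
--         if bigrams.count(e) != 1:
--             bigrams_count_dict[e] = [bigrams.count(e)]
--     for bigram in bigrams_count_dict:
--         bigram_index = [i for i,ltr in enumerate(bigrams) if ltr == bigram]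
--         bigram_index_diff = [bigram_index[a+1] - bigram_index[a] for a in range(0,len(bigram_index)-1)]
--         if all(x == bigram_index_diff[0] for x in bigram_index_diff):
--             bigram_new[bigram] = (bigram_index_diff[0], len(bigram_index_diff))
--     return sorted(bigram_new.items(), key=lambda x: (x[1][1], x[0]), reverse=True)
-- ===== SOURCE B (Python) =====
-- def matches_bigram_start(ciphertext):
--     """Analysing bigrams frequency in text, returns [('MB', (38, 2))] in descending order"""
--     bigrams = [ciphertext[i:i+2] for i in range(0, len(ciphertext), 2)]
--     positions = {}
--     for i, bg in enumerate(bigrams):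
--         positions.setdefault(bg, []).append(i)
--     result = []
--     for bg, idxs in positions.items():
--         if len(idxs) > 1:
--             d = idxs[1] - idxs[0]
--             if all(idxs[a + 1] - idxs[a] == d for a in range(len(idxs) - 1)):
--                 result.append((bg, (d, len(idxs) - 1)))
--     return sorted(result, key=lambda x: (x[1][1], x[0]), reverse=True)
-- ===== Notes on version B (the rewrite author's own statement) =====
-- stated objective: faster
-- what changed: Instead of calling bigrams.count and re-scanning bigrams with enumerate for every distinct bigram, B builds one dict bigram->positions in a single pass and then filters/checks consecutive position differences per entry, sorting at the end.
import Mathlib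
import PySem

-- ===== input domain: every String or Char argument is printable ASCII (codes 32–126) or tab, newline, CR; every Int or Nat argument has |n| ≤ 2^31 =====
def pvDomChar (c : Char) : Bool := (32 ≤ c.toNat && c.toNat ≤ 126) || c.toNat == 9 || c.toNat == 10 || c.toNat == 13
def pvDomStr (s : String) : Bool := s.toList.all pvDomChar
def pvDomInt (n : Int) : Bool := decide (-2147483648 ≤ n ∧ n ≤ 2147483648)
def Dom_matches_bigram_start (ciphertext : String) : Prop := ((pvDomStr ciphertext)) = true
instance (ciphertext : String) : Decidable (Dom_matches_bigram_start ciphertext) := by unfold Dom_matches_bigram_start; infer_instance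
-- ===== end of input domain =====

-- B replaces A's per-distinct-bigram rescans (bigrams.count / enumerate per key) by one dict
-- bigram→positions built in a single pass, then a per-entry difference check; same return value.

-- ===== PORT A =====
def matches_bigram_start (ciphertext : String) : List (String × (Int × Int)) :=
  let bigrams : List String :=
    (PySem.List.pyRange 0 (PySem.Str.len ciphertext) 2).map
      (fun i => PySem.Str.slice ciphertext (some i) (some (i + 2)))
  let bigramsCountDict : PySem.Dict String (List Int) :=
    (PySem.Set.ofList bigrams).foldl
      (fun d e => if bigrams.count e != 1 then d.insert e [(bigrams.count e : Int)] else d)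
      PySem.Dict.empty
  let bigramNew : PySem.Dict String (Int × Int) :=
    bigramsCountDict.keys.foldl
      (fun d bigram =>
        let bigramIndex : List Int :=
          ((PySem.List.enumerate bigrams 0).filter (fun p => p.2 == bigram)).map (·.1)
        let diffs : List Int :=
          (PySem.List.pyRange 0 ((bigramIndex.length : Int) - 1) 1).map
            (fun a => PySem.List.pyGetD bigramIndex (a + 1) 0 - PySem.List.pyGetD bigramIndex a 0)
        if diffs.all (fun x => x == PySem.List.pyGetD diffs 0 0) then
          d.insert bigram (PySem.List.pyGetD diffs 0 0, (diffs.length : Int))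
        else d)
      PySem.Dict.empty
  PySem.List.sorted2 bigramNew.items (fun x => x.2.2) (fun x => x.1) true

-- ===== PORT B =====
def matches_bigram_start_alt (ciphertext : String) : List (String × (Int × Int)) :=
  let bigrams : List String :=
    (PySem.List.pyRange 0 (PySem.Str.len ciphertext) 2).map
      (fun i => PySem.Str.slice ciphertext (some i) (some (i + 2)))
  let positions : PySem.Dict String (List Int) :=
    (PySem.List.enumerate bigrams 0).foldl
      (fun d p => d.modify p.2 [] (fun l => l ++ [p.1]))
      PySem.Dict.empty
  let result : List (String × (Int × Int)) :=
    positions.items.foldl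
      (fun acc p =>
        if 1 < p.2.length then
          let d := PySem.List.pyGetD p.2 1 0 - PySem.List.pyGetD p.2 0 0
          if (PySem.List.pyRange 0 ((p.2.length : Int) - 1) 1).all
              (fun a => PySem.List.pyGetD p.2 (a + 1) 0 - PySem.List.pyGetD p.2 a 0 == d) then
            acc ++ [(p.1, (d, (p.2.length : Int) - 1))]
          else acc
        else acc)
      []
  PySem.List.sorted2 result (fun x => x.2.2) (fun x => x.1) true

-- ===== PRECONDITION & SPEC =====
def Spec_matches_bigram_start (ciphertext : String) (out : List (String × (Int × Int))) : Prop := out = matches_bigram_start_alt ciphertext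
instance (ciphertext : String) (out : List (String × (Int × Int))) : Decidable (Spec_matches_bigram_start ciphertext out) := by unfold Spec_matches_bigram_start; infer_instance

-- ===== CLAIM (what is proved, stated in full; the proofs are below) =====
def Claim_equal_matches_bigram_start : Prop := ∀ (ciphertext : String), Dom_matches_bigram_start ciphertext → Spec_matches_bigram_start ciphertext (matches_bigram_start ciphertext)

-- ===== LEMMAS AND PROOFS =====

-- positions of e among bs (as A's enumerate-comprehension computes them): its length is bs.count e
theorem pv_len_posOf (bs : List String) (e : String) : ∀ s : Int,
    (((PySem.List.enumerate bs s).filter (fun p => p.2 == e)).map (·.1)).length = bs.count e := by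
  induction bs with
  | nil => intro s; simp [PySem.List.enumerate_nil]
  | cons x xs ih =>
    intro s
    by_cases h : x == e <;>
      simp [PySem.List.enumerate_cons, h, List.count_cons, ih]

theorem pv_foldl_modify_swap (l : List (Int × String)) (d : PySem.Dict String (List Int)) :
    l.foldl (fun d p => d.modify p.2 [] (fun xs => xs ++ [p.1])) d
      = (l.map Prod.swap).foldl (fun d p => d.modify p.1 [] (fun xs => xs ++ [p.2])) d := by
  induction l generalizing d with
  | nil => rfl
  | cons x xs ih => simp [ih]

theorem pv_positions_items (bs : List String) :
    ((PySem.List.enumerate bs 0).foldl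
        (fun d p => d.modify p.2 [] (fun l => l ++ [p.1])) PySem.Dict.empty).items
      = (PySem.Set.ofList bs).map
          (fun e => (e, ((PySem.List.enumerate bs 0).filter (fun p => p.2 == e)).map (·.1))) := by
  have hnd : ((PySem.List.enumerate bs 0).foldl
      (fun d p => d.modify p.2 [] (fun l => l ++ [p.1])) PySem.Dict.empty).keys.Nodup :=
    PySem.Dict.nodup_keys_foldl_modify_key (PySem.List.enumerate bs 0) (fun (p : Int × String) => p.2) [] (fun _ p xs => xs ++ [p.1]) _
      PySem.Dict.nodup_keys_empty
  have hkeys : ((PySem.List.enumerate bs 0).foldl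
      (fun d p => d.modify p.2 [] (fun l => l ++ [p.1])) PySem.Dict.empty).keys
      = PySem.Set.ofList bs := by
    rw [PySem.Dict.keys_foldl_modify_key (PySem.List.enumerate bs 0) (fun (p : Int × String) => p.2) [] (fun _ p xs => xs ++ [p.1])]
    simp [PySem.Dict.keys_empty, PySem.Set.update_nil_left, PySem.List.map_snd_enumerate]
  have hget : ∀ e, ((PySem.List.enumerate bs 0).foldl
      (fun d p => d.modify p.2 [] (fun l => l ++ [p.1])) PySem.Dict.empty).getD e []
      = ((PySem.List.enumerate bs 0).filter (fun p => p.2 == e)).map (·.1) := by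
    intro e
    rw [pv_foldl_modify_swap, PySem.Dict.getD_foldl_modify_append]
    simp [List.filter_map, List.map_map, Function.comp_def]
  rw [PySem.Dict.items_eq_map_keys _ hnd [], hkeys]
  exact List.map_congr_left fun e _ => by rw [hget]

theorem pv_foldl_ite_insert {κ ν : Type} [BEq κ] [LawfulBEq κ] (ks : List κ) (c : κ → Bool)
    (f : κ → ν) (d : PySem.Dict κ ν) (hnd : ks.Nodup) (h : ∀ k ∈ ks, d.contains k = false) :
    (ks.foldl (fun d k => if c k then d.insert k (f k) else d) d).items
      = d.items ++ (ks.filter c).map (fun k => (k, f k)) := by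
  induction ks generalizing d with
  | nil => simp
  | cons k ks ih =>
    have hk := h k (by simp)
    have hnd' := (List.nodup_cons.mp hnd)
    simp only [List.foldl_cons, List.filter_cons]
    by_cases hc : c k
    · rw [if_pos hc,
        ih _ hnd'.2 (fun k' hk' => by
          rw [PySem.Dict.contains_insert]
          have hne : k' ≠ k := fun hEq => hnd'.1 (hEq ▸ hk')
          simp [hne, h k' (List.mem_cons_of_mem _ hk')]),
        PySem.Dict.items_insert_of_not_contains _ _ hk]
      simp [hc]
    · rw [if_neg hc, ih _ hnd'.2 (fun k' hk' => h k' (List.mem_cons_of_mem _ hk'))]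
      simp [hc]
-- inner arithmetic: first diff and diff count, for a position list of length ≥ 2
theorem pv_diffs0 (L : List Int) (h2 : 2 ≤ L.length) :
    PySem.List.pyGetD
      ((PySem.List.pyRange 0 ((L.length : Int) - 1) 1).map
        (fun a => PySem.List.pyGetD L (a + 1) 0 - PySem.List.pyGetD L a 0)) 0 0
    = PySem.List.pyGetD L 1 0 - PySem.List.pyGetD L 0 0 := by
  have hcast : ((L.length : Int) - 1) = ((L.length - 1 : Nat) : Int) := by omega
  rw [hcast]
  have := PySem.List.pyGetD_map_pyRange
    (fun a => PySem.List.pyGetD L (a + 1) 0 - PySem.List.pyGetD L a 0)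
    (L.length - 1) 0 0 (by omega)
  simpa using this

theorem pv_diffs_len (L : List Int) (h1 : 1 ≤ L.length) :
    (((PySem.List.pyRange 0 ((L.length : Int) - 1) 1).map
        (fun a => PySem.List.pyGetD L (a + 1) 0 - PySem.List.pyGetD L a 0)).length : Int)
    = (L.length : Int) - 1 := by
  simp [PySem.List.length_pyRange_one]
  omega

-- congruence for filter-then-map under pointwise agreement on the list's members
theorem pv_filter_map_congr {α β : Type} (l : List α) (p q : α → Bool) (f g : α → β)
    (hpq : ∀ e ∈ l, p e = q e) (hfg : ∀ e ∈ l, p e = true → f e = g e) :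
    (l.filter p).map f = (l.filter q).map g := by
  rw [← List.filter_congr hpq]
  exact List.map_congr_left fun e he =>
    hfg e (List.mem_of_mem_filter he) (List.of_mem_filter he)

-- the central fact: A's dict of uniform-gap bigrams equals B's filtered list, before sorting
theorem pv_presort (bs : List String) :
    (((PySem.Set.ofList bs).foldl
        (fun d e => if bs.count e != 1 then d.insert e [(bs.count e : Int)] else d)
        PySem.Dict.empty).keys.foldl
      (fun d bigram =>
        if ((PySem.List.pyRange 0 (((((PySem.List.enumerate bs 0).filter (fun p => p.2 == bigram)).map (·.1)).length : Int) - 1) 1).map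
              (fun a => PySem.List.pyGetD (((PySem.List.enumerate bs 0).filter (fun p => p.2 == bigram)).map (·.1)) (a + 1) 0
                - PySem.List.pyGetD (((PySem.List.enumerate bs 0).filter (fun p => p.2 == bigram)).map (·.1)) a 0)).all
            (fun x => x == PySem.List.pyGetD
              ((PySem.List.pyRange 0 (((((PySem.List.enumerate bs 0).filter (fun p => p.2 == bigram)).map (·.1)).length : Int) - 1) 1).map
                (fun a => PySem.List.pyGetD (((PySem.List.enumerate bs 0).filter (fun p => p.2 == bigram)).map (·.1)) (a + 1) 0
                  - PySem.List.pyGetD (((PySem.List.enumerate bs 0).filter (fun p => p.2 == bigram)).map (·.1)) a 0)) 0 0) then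
          d.insert bigram
            (PySem.List.pyGetD
              ((PySem.List.pyRange 0 (((((PySem.List.enumerate bs 0).filter (fun p => p.2 == bigram)).map (·.1)).length : Int) - 1) 1).map
                (fun a => PySem.List.pyGetD (((PySem.List.enumerate bs 0).filter (fun p => p.2 == bigram)).map (·.1)) (a + 1) 0
                  - PySem.List.pyGetD (((PySem.List.enumerate bs 0).filter (fun p => p.2 == bigram)).map (·.1)) a 0)) 0 0,
             (((PySem.List.pyRange 0 (((((PySem.List.enumerate bs 0).filter (fun p => p.2 == bigram)).map (·.1)).length : Int) - 1) 1).map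
                (fun a => PySem.List.pyGetD (((PySem.List.enumerate bs 0).filter (fun p => p.2 == bigram)).map (·.1)) (a + 1) 0
                  - PySem.List.pyGetD (((PySem.List.enumerate bs 0).filter (fun p => p.2 == bigram)).map (·.1)) a 0)).length : Int))
        else d)
      PySem.Dict.empty).items
    = ((PySem.List.enumerate bs 0).foldl
        (fun d p => d.modify p.2 [] (fun l => l ++ [p.1])) PySem.Dict.empty).items.foldl
        (fun acc p =>
          if 1 < p.2.length then
            if (PySem.List.pyRange 0 ((p.2.length : Int) - 1) 1).all
                (fun a => PySem.List.pyGetD p.2 (a + 1) 0 - PySem.List.pyGetD p.2 a 0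
                  == PySem.List.pyGetD p.2 1 0 - PySem.List.pyGetD p.2 0 0) then
              acc ++ [(p.1, (PySem.List.pyGetD p.2 1 0 - PySem.List.pyGetD p.2 0 0, (p.2.length : Int) - 1))]
            else acc
          else acc)
        [] := by
  rw [pv_positions_items bs]
  have hBfun :
      (fun (acc : List (String × (Int × Int))) (p : String × List Int) =>
        if 1 < p.2.length then
          if (PySem.List.pyRange 0 ((p.2.length : Int) - 1) 1).all
              (fun a => PySem.List.pyGetD p.2 (a + 1) 0 - PySem.List.pyGetD p.2 a 0
                == PySem.List.pyGetD p.2 1 0 - PySem.List.pyGetD p.2 0 0) then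
            acc ++ [(p.1, (PySem.List.pyGetD p.2 1 0 - PySem.List.pyGetD p.2 0 0, (p.2.length : Int) - 1))]
          else acc
        else acc)
      = (fun (acc : List (String × (Int × Int))) (p : String × List Int) =>
          if (decide (1 < p.2.length) && (PySem.List.pyRange 0 ((p.2.length : Int) - 1) 1).all
              (fun a => PySem.List.pyGetD p.2 (a + 1) 0 - PySem.List.pyGetD p.2 a 0
                == PySem.List.pyGetD p.2 1 0 - PySem.List.pyGetD p.2 0 0)) then
            acc ++ [(p.1, (PySem.List.pyGetD p.2 1 0 - PySem.List.pyGetD p.2 0 0, (p.2.length : Int) - 1))]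
          else acc) := by
    funext acc p
    by_cases h1 : 1 < p.2.length <;> simp [h1]
  rw [hBfun, PySem.List.foldl_append_if]
  have hkeys : ((PySem.Set.ofList bs).foldl
      (fun d e => if bs.count e != 1 then d.insert e [(bs.count e : Int)] else d)
      PySem.Dict.empty).keys
      = (PySem.Set.ofList bs).filter (fun e => bs.count e != 1) := by
    rw [show ((PySem.Set.ofList bs).foldl
        (fun d e => if bs.count e != 1 then d.insert e [(bs.count e : Int)] else d)
        PySem.Dict.empty).keys = List.map (fun x => x.1) ((PySem.Set.ofList bs).foldl
        (fun d e => if bs.count e != 1 then d.insert e [(bs.count e : Int)] else d)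
        PySem.Dict.empty).items from rfl]
    rw [pv_foldl_ite_insert (PySem.Set.ofList bs) (fun e => bs.count e != 1)
        (fun e => [(bs.count e : Int)]) PySem.Dict.empty (PySem.Set.nodup_ofList bs)
        (fun k _ => PySem.Dict.contains_empty k)]
    simp [List.map_map, Function.comp_def,
      show (PySem.Dict.empty : PySem.Dict String (List Int)).items = [] from rfl]
  rw [hkeys]
  rw [pv_foldl_ite_insert ((PySem.Set.ofList bs).filter (fun e => bs.count e != 1))
      (fun bigram =>
        ((PySem.List.pyRange 0 (((((PySem.List.enumerate bs 0).filter (fun p => p.2 == bigram)).map (·.1)).length : Int) - 1) 1).map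
            (fun a => PySem.List.pyGetD (((PySem.List.enumerate bs 0).filter (fun p => p.2 == bigram)).map (·.1)) (a + 1) 0
              - PySem.List.pyGetD (((PySem.List.enumerate bs 0).filter (fun p => p.2 == bigram)).map (·.1)) a 0)).all
          (fun x => x == PySem.List.pyGetD
            ((PySem.List.pyRange 0 (((((PySem.List.enumerate bs 0).filter (fun p => p.2 == bigram)).map (·.1)).length : Int) - 1) 1).map
              (fun a => PySem.List.pyGetD (((PySem.List.enumerate bs 0).filter (fun p => p.2 == bigram)).map (·.1)) (a + 1) 0
                - PySem.List.pyGetD (((PySem.List.enumerate bs 0).filter (fun p => p.2 == bigram)).map (·.1)) a 0)) 0 0))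
      (fun bigram =>
        (PySem.List.pyGetD
            ((PySem.List.pyRange 0 (((((PySem.List.enumerate bs 0).filter (fun p => p.2 == bigram)).map (·.1)).length : Int) - 1) 1).map
              (fun a => PySem.List.pyGetD (((PySem.List.enumerate bs 0).filter (fun p => p.2 == bigram)).map (·.1)) (a + 1) 0
                - PySem.List.pyGetD (((PySem.List.enumerate bs 0).filter (fun p => p.2 == bigram)).map (·.1)) a 0)) 0 0,
         (((PySem.List.pyRange 0 (((((PySem.List.enumerate bs 0).filter (fun p => p.2 == bigram)).map (·.1)).length : Int) - 1) 1).map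
              (fun a => PySem.List.pyGetD (((PySem.List.enumerate bs 0).filter (fun p => p.2 == bigram)).map (·.1)) (a + 1) 0
                - PySem.List.pyGetD (((PySem.List.enumerate bs 0).filter (fun p => p.2 == bigram)).map (·.1)) a 0)).length : Int)))
      PySem.Dict.empty (List.Nodup.filter _ (PySem.Set.nodup_ofList bs))
      (fun k _ => PySem.Dict.contains_empty k)]
  simp only [List.nil_append, List.filter_map, List.map_map, List.filter_filter,
    Function.comp_def]
  apply pv_filter_map_congr
  · intro e he
    have hmem : e ∈ bs := by rwa [PySem.Set.mem_ofList] at he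
    have hL := pv_len_posOf bs e 0
    have hL' : ((PySem.List.enumerate bs 0).filter (fun p => p.2 == e)).length = bs.count e := by
      simpa using hL
    have hcnt : 0 < bs.count e := List.count_pos_iff.mpr hmem
    by_cases hone : bs.count e = 1
    · simp [hone, hL']
    · have h2 : 2 ≤ (((PySem.List.enumerate bs 0).filter (fun p => p.2 == e)).map (·.1)).length := by
        rw [hL]; omega
      rw [pv_diffs0 _ h2]
      simp [List.all_map, Function.comp_def, hone, hL',
        show 1 < bs.count e from by omega]
  · intro e he hc
    have hmem : e ∈ bs := by rwa [PySem.Set.mem_ofList] at he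
    have hL := pv_len_posOf bs e 0
    have hL' : ((PySem.List.enumerate bs 0).filter (fun p => p.2 == e)).length = bs.count e := by
      simpa using hL
    have hcnt : 0 < bs.count e := List.count_pos_iff.mpr hmem
    have hone : bs.count e ≠ 1 := by
      intro h1
      simp [h1, hL'] at hc
    have h2 : 2 ≤ (((PySem.List.enumerate bs 0).filter (fun p => p.2 == e)).map (·.1)).length := by
      rw [hL]; omega
    rw [pv_diffs0 _ h2, pv_diffs_len _ (by omega)]


-- ===== VERDICT (by name: the statement is the Claim_ definition above) =====
theorem matches_bigram_start_spec : Claim_equal_matches_bigram_start := by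
  intro s _
  show matches_bigram_start s = matches_bigram_start_alt s
  simp only [matches_bigram_start, matches_bigram_start_alt]
  rw [pv_presort]
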